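-- pv_equiv track=rewrite | github.com/doozan/spanish_tools | spanish_words/__init__.py | get_best_defs
-- ===== SOURCE A (Python) =====
-- def get_best_defs(defs,limit):
--     best = []
--
--     if len(defs) <= limit:
--         return defs
--
--     #primary_defs = [ x[1:] for x in defs if x.startswith(';') ]
--
--     # number of primary defs >= limit just return first limit defs
--     #if len(primary_defs) >= limit:
--     #    return primary_defs[:limit]
--
--     # only one primary def, just return the first limit defs
--     #elif len(primary_defs) == 1:
--     #    return defs[:limit]
--
--     # otherwise, build a list of defs to keep starting with primary defs
--     # then the first syn of each def
--     # then the second...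
--     # until we've hit the limit of keepers
--     # Since it's important to keep the primary def and the synonyms together
--     # we build a list of keepers by their index and then sort that index to
--     # get things in the correct order
--
--     keepidx = []
--     keep_depth = 0
--
--     while len(keepidx) < limit:
--         cur_depth=0
--         index=0
--         for item in defs:
--             if item.startswith(';'):
--                 cur_depth=0
--             else:
--                 cur_depth += 1
--
--             if cur_depth == keep_depth:
--                 keepidx.append(index)
--                 if len(keepidx) >= int(limit):
--                     break
--             index += 1
--         keep_depth += 1
--         if keep_depth > 3:
--             break;
--
--     keepers = []
--     for idx in sorted(keepidx):
--         keepers.append(defs[idx])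
--
--     return keepers
-- ===== SOURCE B (Python) =====
-- def get_best_defs(defs, limit):
--     # One bucketing pass: depth per item (0 on ';'-prefixed, else prev+1),
--     # indices pushed into buckets[0..3]; concatenate, truncate, sort, map.
--     if len(defs) <= limit:
--         return defs
--     buckets = [[], [], [], []]
--     depth = 0
--     i = 0
--     for item in defs:
--         depth = 0 if item.startswith(';') else depth + 1
--         if depth < 4:
--             buckets[depth].append(i)
--         i += 1
--     keep = (buckets[0] + buckets[1] + buckets[2] + buckets[3])[:max(limit, 0)]
--     return [defs[i] for i in sorted(keep)]
-- ===== Notes on version B (the rewrite author's own statement) =====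
-- stated objective: simpler
-- what changed: A rescans defs once per depth 0..3 (up to 4 passes, each recomputing every item's depth and breaking mid-pass at the limit); B makes one bucketing pass computing each index's depth and pushing it into buckets[0..3], then concatenates the buckets, truncates to limit, sorts the kept indices and maps them back.
import Mathlib
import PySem

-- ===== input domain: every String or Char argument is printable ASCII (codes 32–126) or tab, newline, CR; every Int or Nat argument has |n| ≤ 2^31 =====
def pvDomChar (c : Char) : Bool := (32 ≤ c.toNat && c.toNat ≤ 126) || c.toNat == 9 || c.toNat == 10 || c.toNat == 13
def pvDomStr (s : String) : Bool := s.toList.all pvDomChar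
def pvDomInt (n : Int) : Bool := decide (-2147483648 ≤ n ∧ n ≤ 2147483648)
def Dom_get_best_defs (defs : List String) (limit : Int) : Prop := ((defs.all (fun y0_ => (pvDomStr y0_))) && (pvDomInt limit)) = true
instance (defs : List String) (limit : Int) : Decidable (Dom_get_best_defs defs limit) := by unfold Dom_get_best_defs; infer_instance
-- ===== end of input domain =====

-- B replaces A's up-to-4 rescans of `defs` by one bucketing pass over `defs`
-- (objective: simpler, single pass); same return value everywhere.

-- ===== PORT A =====
-- inner `for item in defs` loop: state = (cur_depth, index, keepidx); breaks when limit reached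
def pvInnerA (keep_depth : Nat) (limit : Int) : List String → Nat → Nat → List Nat → List Nat
  | [], _, _, keepidx => keepidx
  | item :: rest, cur_depth, index, keepidx =>
    let cd := if PySem.Str.startswith item ";" then 0 else cur_depth + 1
    if cd = keep_depth then
      let keepidx' := keepidx ++ [index]
      if (keepidx'.length : Int) ≥ limit then keepidx'
      else pvInnerA keep_depth limit rest cd (index + 1) keepidx'
    else pvInnerA keep_depth limit rest cd (index + 1) keepidx

-- outer `while len(keepidx) < limit` loop; `keep_depth += 1; if keep_depth > 3: break`
def pvLoopA (defs : List String) (limit : Int) (keep_depth : Nat) (keepidx : List Nat) : List Nat :=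
  if (keepidx.length : Int) < limit then
    let k := pvInnerA keep_depth limit defs 0 0 keepidx
    if keep_depth + 1 > 3 then k
    else pvLoopA defs limit (keep_depth + 1) k
  else keepidx
termination_by 4 - keep_depth
decreasing_by omega

def get_best_defs (defs : List String) (limit : Int) : List String :=
  if (defs.length : Int) ≤ limit then defs
  else
    let keepidx := pvLoopA defs limit 0 []
    -- `for idx in sorted(keepidx): keepers.append(defs[idx])`; every idx is < defs.length,
    -- so getD's default is never used (exact for Python's defs[idx])
    (PySem.List.sorted keepidx (fun x => x) false).foldl (fun acc i => acc ++ [defs.getD i ""]) []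

-- ===== PORT B =====
-- one step of Source B's single loop: state = (depth, i, buckets[0..3]); `if depth < 4: buckets[depth].append(i)`
def pvStepB (st : Nat × Nat × List Nat × List Nat × List Nat × List Nat) (item : String) :
    Nat × Nat × List Nat × List Nat × List Nat × List Nat :=
  match st with
  | (depth, i, b0, b1, b2, b3) =>
    let d := if PySem.Str.startswith item ";" then 0 else depth + 1
    (d, i + 1,
     if d = 0 then b0 ++ [i] else b0,
     if d = 1 then b1 ++ [i] else b1,
     if d = 2 then b2 ++ [i] else b2,
     if d = 3 then b3 ++ [i] else b3)

def get_best_defs_alt (defs : List String) (limit : Int) : List String :=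
  if (defs.length : Int) ≤ limit then defs
  else
    let st := defs.foldl pvStepB (0, 0, [], [], [], [])
    let keep := (st.2.2.1 ++ st.2.2.2.1 ++ st.2.2.2.2.1 ++ st.2.2.2.2.2).take (max limit 0).toNat
    -- `[defs[i] for i in sorted(keep)]`; every i is < defs.length (exact for Python's defs[i])
    (PySem.List.sorted keep (fun x => x) false).map (fun i => defs.getD i "")

-- ===== PRECONDITION & SPEC =====
def Spec_get_best_defs (defs : List String) (limit : Int) (out : List String) : Prop := out = get_best_defs_alt defs limit
instance (defs : List String) (limit : Int) (out : List String) : Decidable (Spec_get_best_defs defs limit out) := by unfold Spec_get_best_defs; infer_instance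

-- ===== CLAIM (what is proved, stated in full; the proofs are below) =====
def Claim_equal_get_best_defs : Prop := ∀ (defs : List String) (limit : Int), Dom_get_best_defs defs limit → Spec_get_best_defs defs limit (get_best_defs defs limit)

-- ===== LEMMAS AND PROOFS =====

-- the list of indices of depth d, scanning l with current depth `cur` and next index `idx`
def pvBucket (d : Nat) : List String → Nat → Nat → List Nat
  | [], _, _ => []
  | item :: rest, cur, idx =>
    let cd := if PySem.Str.startswith item ";" then 0 else cur + 1
    (if cd = d then [idx] else []) ++ pvBucket d rest cd (idx + 1)

lemma pvInnerA_eq (d : Nat) (limit : Int) :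
    ∀ (l : List String) (cur idx : Nat) (acc : List Nat), (acc.length : Int) < limit →
    pvInnerA d limit l cur idx acc = acc ++ (pvBucket d l cur idx).take (limit - acc.length).toNat := by
  intro l
  induction l with
  | nil => intro cur idx acc h; simp [pvInnerA, pvBucket]
  | cons item rest ih =>
    intro cur idx acc h
    simp only [pvInnerA, pvBucket]
    by_cases hcd : (if PySem.Str.startswith item ";" then 0 else cur + 1) = d
    · simp only [hcd, if_pos, eq_self_iff_true]
      by_cases hstop : ((acc ++ [idx]).length : Int) ≥ limit
      · rw [if_pos hstop]
        have hn : (limit - (acc.length : Int)).toNat = 1 := by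
          simp at hstop; omega
        simp [hn]
      · have h' : (((acc ++ [idx]).length : Int)) < limit := by
          simp at hstop ⊢; omega
        rw [if_neg hstop, ih _ _ _ h']
        have hpos : 1 ≤ (limit - (acc.length : Int)).toNat := by omega
        obtain ⟨m, hm⟩ : ∃ m, (limit - (acc.length : Int)).toNat = m + 1 :=
          ⟨_, (Nat.succ_pred_eq_of_pos hpos).symm⟩
        have hn : (limit - ((acc ++ [idx]).length : Int)).toNat = m := by
          simp; omega
        rw [hn, hm]
        simp [List.take_succ_cons]
    · simp only [if_neg hcd, List.nil_append]
      rw [ih _ _ _ h]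

-- one outer-loop pass, entered with keepidx = P.take n still short of the limit
lemma pvStep_spec (limit : Int) (defs : List String) (d : Nat) (P : List Nat)
    (h0 : 0 < limit) (hlt : (((P.take limit.toNat).length : Int)) < limit) :
    pvInnerA d limit defs 0 0 (P.take limit.toNat)
      = (P ++ pvBucket d defs 0 0).take limit.toNat := by
  have hP : P.length < limit.toNat := by
    simp at hlt; omega
  have hPt : P.take limit.toNat = P := List.take_of_length_le (le_of_lt hP)
  rw [hPt, pvInnerA_eq d limit defs 0 0 P (by omega)]
  rw [List.take_append, List.take_of_length_le (le_of_lt hP)]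
  congr 2
  omega

-- once the limit is reached, appending further buckets changes nothing
lemma pvStop_spec (limit : Int) (P B : List Nat)
    (hge : ¬ (((P.take limit.toNat).length : Int)) < limit) :
    (P ++ B).take limit.toNat = P.take limit.toNat := by
  have hP : limit.toNat ≤ P.length := by simp at hge ⊢; omega
  rw [List.take_append]
  have : limit.toNat - P.length = 0 := by omega
  simp [this]

lemma pvLoopA_spec (defs : List String) (limit : Int) :
    pvLoopA defs limit 0 []
      = (pvBucket 0 defs 0 0 ++ pvBucket 1 defs 0 0 ++ pvBucket 2 defs 0 0
          ++ pvBucket 3 defs 0 0).take limit.toNat := by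
  by_cases h0 : 0 < limit
  · have hnil : ([] : List Nat) = ([] : List Nat).take limit.toNat := by simp
    rw [pvLoopA]
    simp only [List.length_nil, Int.natCast_zero, h0, if_pos, Nat.reduceAdd]
    norm_num
    rw [hnil, pvStep_spec limit defs 0 [] h0 (by simpa using h0)]
    simp only [List.nil_append]
    set P0 := pvBucket 0 defs 0 0 with hP0
    rw [pvLoopA]
    by_cases h1 : (((P0.take limit.toNat).length : Int)) < limit
    · simp only [if_pos h1]
      norm_num
      rw [pvStep_spec limit defs 1 P0 h0 h1]
      set P1 := P0 ++ pvBucket 1 defs 0 0 with hP1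
      rw [pvLoopA]
      by_cases h2 : (((P1.take limit.toNat).length : Int)) < limit
      · simp only [if_pos h2]
        norm_num
        rw [pvStep_spec limit defs 2 P1 h0 h2]
        set P2 := P1 ++ pvBucket 2 defs 0 0 with hP2
        rw [pvLoopA]
        by_cases h3 : (((P2.take limit.toNat).length : Int)) < limit
        · simp only [if_pos h3]
          norm_num
          rw [pvStep_spec limit defs 3 P2 h0 h3]
          simp [hP1, hP2, List.append_assoc]
        · simp only [if_neg h3]
          rw [← pvStop_spec limit P2 (pvBucket 3 defs 0 0) h3]
          simp [hP1, hP2, List.append_assoc]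
      · simp only [if_neg h2]
        rw [← pvStop_spec limit P1 (pvBucket 2 defs 0 0 ++ pvBucket 3 defs 0 0) h2]
        simp [hP1, List.append_assoc]
    · simp only [if_neg h1]
      rw [← pvStop_spec limit P0 (pvBucket 1 defs 0 0 ++ pvBucket 2 defs 0 0 ++ pvBucket 3 defs 0 0) h1]
      simp [List.append_assoc]
  · rw [pvLoopA]
    have : ¬ ((([] : List Nat).length : Int) < limit) := by simp; omega
    rw [if_neg this]
    have : limit.toNat = 0 := by omega
    simp [this]

-- B's fold computes exactly the four buckets
lemma pvFoldB_spec :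
    ∀ (l : List String) (cur i : Nat) (b0 b1 b2 b3 : List Nat),
    ∃ d' i', l.foldl pvStepB (cur, i, b0, b1, b2, b3)
      = (d', i', b0 ++ pvBucket 0 l cur i, b1 ++ pvBucket 1 l cur i,
          b2 ++ pvBucket 2 l cur i, b3 ++ pvBucket 3 l cur i) := by
  intro l
  induction l with
  | nil => intro cur i b0 b1 b2 b3; exact ⟨cur, i, by simp [pvBucket]⟩
  | cons item rest ih =>
    intro cur i b0 b1 b2 b3
    simp only [List.foldl_cons, pvStepB]
    obtain ⟨d', i', hih⟩ := ih (if PySem.Str.startswith item ";" then 0 else cur + 1) (i + 1)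
      (if (if PySem.Str.startswith item ";" then 0 else cur + 1) = 0 then b0 ++ [i] else b0)
      (if (if PySem.Str.startswith item ";" then 0 else cur + 1) = 1 then b1 ++ [i] else b1)
      (if (if PySem.Str.startswith item ";" then 0 else cur + 1) = 2 then b2 ++ [i] else b2)
      (if (if PySem.Str.startswith item ";" then 0 else cur + 1) = 3 then b3 ++ [i] else b3)
    refine ⟨d', i', ?_⟩
    rw [hih]
    simp only [pvBucket]
    split_ifs <;> simp [List.append_assoc]

lemma pvFoldl_append_eq_map (f : Nat → String) :
    ∀ (l : List Nat) (acc : List String),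
    l.foldl (fun a i => a ++ [f i]) acc = acc ++ l.map f := by
  intro l
  induction l with
  | nil => simp
  | cons x xs ih => intro acc; simp [ih, List.append_assoc]

-- ===== VERDICT (by name: the statement is the Claim_ definition above) =====
theorem get_best_defs_spec : Claim_equal_get_best_defs := by
  intro defs limit _
  unfold Spec_get_best_defs get_best_defs get_best_defs_alt
  by_cases he : (defs.length : Int) ≤ limit
  · simp [he]
  · simp only [if_neg he]
    obtain ⟨d', i', hfold⟩ := pvFoldB_spec defs 0 0 [] [] [] []
    rw [hfold]
    simp only [List.nil_append]
    have hmax : (max limit 0).toNat = limit.toNat := by omega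
    rw [hmax, pvLoopA_spec defs limit, pvFoldl_append_eq_map]
    simp
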